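-- pv_equiv track=rewrite | github.com/Mrdoom009/Num | nidhi.py | to_math_sans_plain
-- ===== SOURCE A (Python) =====
-- def to_math_sans_plain(text: str) -> str:
--     converted = []
--     for char in text:
--         if 'A' <= char <= 'Z':
--             converted.append(chr(ord(char) + 0x1D5A0 - ord('A')))
--         elif 'a' <= char <= 'z':
--             converted.append(chr(ord(char) + 0x1D5BA - ord('a')))
--         elif '0' <= char <= '9':
--             converted.append(chr(ord(char) + 0x1D7E2 - ord('0')))
--         else:
--             converted.append(char)
--     return ''.join(converted)
-- ===== SOURCE B (Python) =====
-- _PAIRS = (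
--     [(chr(c), chr(c + 0x1D5A0 - 0x41)) for c in range(0x41, 0x5B)]
--     + [(chr(c), chr(c + 0x1D5BA - 0x61)) for c in range(0x61, 0x7B)]
--     + [(chr(c), chr(c + 0x1D7E2 - 0x30)) for c in range(0x30, 0x3A)]
-- )
--
-- def to_math_sans_plain(text: str) -> str:
--     # Staged passes: one whole-string replace per mapped character.
--     # Correct because every replacement target is outside ASCII, so no
--     # later pass can touch the output of an earlier one.
--     for src, dst in _PAIRS:
--         text = text.replace(src, dst)
--     return text
-- ===== Notes on version B (the rewrite author's own statement) =====
-- stated objective: faster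
-- what changed: Replaces A's single per-character if/elif branching loop with 62 staged whole-string str.replace passes (one per mapped source character), correct because all replacement targets lie outside ASCII; the passes run at C level instead of a Python-level loop.
import Mathlib
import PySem

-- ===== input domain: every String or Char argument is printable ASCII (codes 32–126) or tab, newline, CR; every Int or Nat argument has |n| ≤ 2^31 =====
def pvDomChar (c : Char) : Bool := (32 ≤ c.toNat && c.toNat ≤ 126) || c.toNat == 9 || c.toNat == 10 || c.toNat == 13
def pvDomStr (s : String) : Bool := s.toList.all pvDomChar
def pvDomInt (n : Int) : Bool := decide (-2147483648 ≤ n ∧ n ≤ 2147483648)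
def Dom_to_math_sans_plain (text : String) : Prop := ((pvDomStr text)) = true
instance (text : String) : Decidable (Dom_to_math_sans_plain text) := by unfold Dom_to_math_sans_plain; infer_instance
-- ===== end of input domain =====

set_option maxRecDepth 8000


-- B replaces A's per-character if/elif loop by 62 staged whole-string replace passes, one per
-- mapped source character (alternative decomposition; correct since targets are outside ASCII).

-- ===== PORT A =====
def to_math_sans_plain (text : String) : String :=
  let converted : List Char :=
    text.toList.foldl (fun acc char =>
      if 'A' ≤ char ∧ char ≤ 'Z' then
        acc ++ [Char.ofNat (char.toNat + 0x1D5A0 - 65)]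
      else if 'a' ≤ char ∧ char ≤ 'z' then
        acc ++ [Char.ofNat (char.toNat + 0x1D5BA - 97)]
      else if '0' ≤ char ∧ char ≤ '9' then
        acc ++ [Char.ofNat (char.toNat + 0x1D7E2 - 48)]
      else
        acc ++ [char]) []
  String.ofList converted

-- ===== PORT B =====
-- the list _PAIRS of Source B: (source char, replacement char) for A-Z, a-z, 0-9
def sansPairs : List (Char × Char) :=
  ((PySem.List.pyRange 0x41 0x5B 1).map
    (fun c => (Char.ofNat c.toNat, Char.ofNat (c.toNat + 0x1D5A0 - 0x41)))) ++
  ((PySem.List.pyRange 0x61 0x7B 1).map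
    (fun c => (Char.ofNat c.toNat, Char.ofNat (c.toNat + 0x1D5BA - 0x61)))) ++
  ((PySem.List.pyRange 0x30 0x3A 1).map
    (fun c => (Char.ofNat c.toNat, Char.ofNat (c.toNat + 0x1D7E2 - 0x30))))

-- Source B's loop: text = text.replace(src, dst) for each pair
def to_math_sans_plain_alt (text : String) : String :=
  sansPairs.foldl
    (fun t p => PySem.Str.replace t (String.ofList [p.1]) (String.ofList [p.2])) text

-- ===== PRECONDITION & SPEC =====
def Spec_to_math_sans_plain (text : String) (out : String) : Prop := out = to_math_sans_plain_alt text
instance (text : String) (out : String) : Decidable (Spec_to_math_sans_plain text out) := by unfold Spec_to_math_sans_plain; infer_instance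

-- ===== CLAIM (what is proved, stated in full; the proofs are below) =====
def Claim_equal_to_math_sans_plain : Prop := ∀ (text : String), Dom_to_math_sans_plain text → Spec_to_math_sans_plain text (to_math_sans_plain text)

-- ===== LEMMAS AND PROOFS =====

-- the single character A's loop body appends for a character
def convA (char : Char) : Char :=
  if 'A' ≤ char ∧ char ≤ 'Z' then Char.ofNat (char.toNat + 0x1D5A0 - 65)
  else if 'a' ≤ char ∧ char ≤ 'z' then Char.ofNat (char.toNat + 0x1D5BA - 97)
  else if '0' ≤ char ∧ char ≤ '9' then Char.ofNat (char.toNat + 0x1D7E2 - 48)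
  else char

-- substitution performed by one replace pass, at one character
def subst1 (p : Char × Char) (c : Char) : Char := if c = p.1 then p.2 else c

theorem foldA_eq_map (l : List Char) (acc : List Char) :
    l.foldl (fun acc char =>
      if 'A' ≤ char ∧ char ≤ 'Z' then acc ++ [Char.ofNat (char.toNat + 0x1D5A0 - 65)]
      else if 'a' ≤ char ∧ char ≤ 'z' then acc ++ [Char.ofNat (char.toNat + 0x1D5BA - 97)]
      else if '0' ≤ char ∧ char ≤ '9' then acc ++ [Char.ofNat (char.toNat + 0x1D7E2 - 48)]
      else acc ++ [char]) acc = acc ++ l.map convA := by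
  induction l generalizing acc with
  | nil => simp
  | cons c t ih =>
    simp only [List.foldl_cons, List.map_cons, ih, convA]
    split_ifs <;> simp

-- replace with a single-character pattern is a pointwise substitution
theorem replaceGo_single (o n : Char) :
    ∀ (fuel : Nat) (l acc : List Char), l.length ≤ fuel →
      PySem.Chars.replace.go [o] [n] fuel l acc
        = acc.reverse ++ l.map (fun c => if c = o then n else c) := by
  intro fuel
  induction fuel with
  | zero =>
    intro l acc h
    have : l = [] := List.eq_nil_of_length_eq_zero (Nat.le_zero.mp h)
    subst this; simp [PySem.Chars.replace.go]
  | succ f ih =>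
    intro l acc h
    cases l with
    | nil => simp [PySem.Chars.replace.go]
    | cons c t =>
      simp only [PySem.Chars.replace.go]
      by_cases hc : c = o
      · subst hc
        have hp : List.isPrefixOf [c] (c :: t) = true := by
          simp [List.isPrefixOf]
        simp only [hp, List.length_cons, if_true] at *
        have hd : List.drop (List.length ([] : List Char) + 1) (c :: t) = t := by simp
        rw [hd, ih t (List.reverse [n] ++ acc) (by omega)]
        simp
      · have hp : List.isPrefixOf [o] (c :: t) = false := by
          simp [List.isPrefixOf]; exact fun h' => absurd h'.symm hc
        simp only [hp, Bool.false_eq_true, ite_false]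
        rw [ih t (c :: acc) (by simp at h; omega)]
        simp [hc]

theorem replace_single (o n : Char) (l : List Char) :
    PySem.Chars.replace l [o] [n] = l.map (fun c => if c = o then n else c) := by
  simp only [PySem.Chars.replace, List.isEmpty]
  exact (replaceGo_single o n l.length l [] (le_refl _)).trans (by simp)

-- Source B's replace loop, as a list of chars: iterated pointwise substitution
theorem foldB_toList (ps : List (Char × Char)) (t : String) :
    (ps.foldl (fun t p => PySem.Str.replace t (String.ofList [p.1]) (String.ofList [p.2])) t).toList
      = t.toList.map (fun c => ps.foldl (fun c p => subst1 p c) c) := by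
  induction ps generalizing t with
  | nil => simp
  | cons p rest ih =>
    rw [List.foldl_cons, ih]
    simp [PySem.Str.replace, replace_single, List.map_map, subst1, Function.comp]

-- on every domain character (code < 128) the 62 passes compute exactly A's branch result
set_option maxHeartbeats 2000000 in
theorem conv_eq_of_lt :
    ∀ m < 128, sansPairs.foldl (fun c p => subst1 p c) (Char.ofNat m) = convA (Char.ofNat m) := by
  decide

-- ===== VERDICT (by name: the statement is the Claim_ definition above) =====
theorem to_math_sans_plain_spec : Claim_equal_to_math_sans_plain := by
  intro text hdom
  unfold Spec_to_math_sans_plain to_math_sans_plain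
  rw [foldA_eq_map]
  simp only [List.nil_append]
  have hB : (to_math_sans_plain_alt text).toList
      = text.toList.map (fun c => sansPairs.foldl (fun c p => subst1 p c) c) := by
    unfold to_math_sans_plain_alt; exact foldB_toList sansPairs text
  have h3 : List.map convA text.toList = (to_math_sans_plain_alt text).toList := by
    rw [hB]
    apply List.map_congr_left
    intro c hc
    have hdc : pvDomChar c = true := by
      simp only [Dom_to_math_sans_plain, pvDomStr, List.all_eq_true] at hdom
      exact hdom c hc
    have hlt : c.toNat < 128 := by
      simp only [pvDomChar, Bool.or_eq_true, Bool.and_eq_true, beq_iff_eq, decide_eq_true_eq] at hdc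
      omega
    have := conv_eq_of_lt c.toNat hlt
    rw [Char.ofNat_toNat] at this
    exact this.symm
  rw [h3, String.ofList_toList]
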